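-- pv_equiv track=rewrite | github.com/WuzenLiz/Code | randomcode.py | calculate_thrust
-- ===== SOURCE A (Python) =====
-- def calculate_thrust(distance):
--     thrust_levels = {
--         5000: 100, 2000: 50, 1000: 25, 500: 10, 250: 5, 100: 1, 0: 0
--     }
--     for threshold, thrust in thrust_levels.items():
--         if distance > threshold:
--             return thrust
--     return 0
-- ===== SOURCE B (Python) =====
-- _THRESHOLDS = [0, 100, 250, 500, 1000, 2000, 5000]
-- _THRUSTS = [0, 1, 5, 10, 25, 50, 100]
--
-- def calculate_thrust(distance):
--     # binary search: lo ends as the number of thresholds strictly below distance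
--     lo, hi = 0, len(_THRESHOLDS)
--     while lo < hi:
--         mid = (lo + hi) // 2
--         if _THRESHOLDS[mid] < distance:
--             lo = mid + 1
--         else:
--             hi = mid
--     return _THRUSTS[lo - 1] if lo > 0 else 0
-- ===== Notes on version B (the rewrite author's own statement) =====
-- stated objective: alternative
-- what changed: Replaces the descending-dict linear first-match scan with a binary search (bisect_left by hand) over an ascending threshold table plus an aligned thrust table.
import Mathlib
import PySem

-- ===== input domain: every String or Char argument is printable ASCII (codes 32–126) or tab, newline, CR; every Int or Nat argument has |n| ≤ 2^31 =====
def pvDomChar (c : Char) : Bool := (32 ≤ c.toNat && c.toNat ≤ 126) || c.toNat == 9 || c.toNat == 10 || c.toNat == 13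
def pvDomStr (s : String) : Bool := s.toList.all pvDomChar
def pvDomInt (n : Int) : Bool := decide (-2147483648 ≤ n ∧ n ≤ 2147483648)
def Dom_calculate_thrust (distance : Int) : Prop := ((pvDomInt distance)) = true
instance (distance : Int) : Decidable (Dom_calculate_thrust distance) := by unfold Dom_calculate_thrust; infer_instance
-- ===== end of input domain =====

-- B replaces A's descending linear scan by a hand-written binary search over an ascending
-- threshold table; objective: alternative algorithm, same result.


-- ===== PORT A =====
-- the Python dict literal has distinct keys, kept in insertion order; items() is its pair list
def ctScan (distance : Int) : List (Int × Int) → Int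
  | [] => 0                                   -- falls off the loop: return 0
  | (threshold, thrust) :: rest =>
      if distance > threshold then thrust else ctScan distance rest

def calculate_thrust (distance : Int) : Int :=
  let thrust_levels : PySem.Dict Int Int :=
    PySem.Dict.mk [(5000, 100), (2000, 50), (1000, 25), (500, 10), (250, 5), (100, 1), (0, 0)]
  ctScan distance thrust_levels.items

-- ===== PORT B =====
def pvThresholds : List Int := [0, 100, 250, 500, 1000, 2000, 5000]
def pvThrusts : List Int := [0, 1, 5, 10, 25, 50, 100]

-- the while loop, fuel-bounded only for totality (7 ≥ log2 of the table size; loop halves hi-lo)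
def ctLoop (distance : Int) : Nat → Nat → Nat → Nat
  | 0, lo, _ => lo
  | fuel + 1, lo, hi =>
      if lo < hi then
        let mid := (lo + hi) / 2
        if (PySem.List.pyGet? pvThresholds (mid : Int)).getD 0 < distance then
          ctLoop distance fuel (mid + 1) hi
        else
          ctLoop distance fuel lo mid
      else lo

def calculate_thrust_alt (distance : Int) : Int :=
  let lo := ctLoop distance 7 0 pvThresholds.length
  if lo > 0 then (PySem.List.pyGet? pvThrusts ((lo : Int) - 1)).getD 0 else 0

-- ===== PRECONDITION & SPEC =====
def Spec_calculate_thrust (distance : Int) (out : Int) : Prop := out = calculate_thrust_alt distance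
instance (distance : Int) (out : Int) : Decidable (Spec_calculate_thrust distance out) := by unfold Spec_calculate_thrust; infer_instance

-- ===== CLAIM (what is proved, stated in full; the proofs are below) =====
def Claim_equal_calculate_thrust : Prop := ∀ (distance : Int), Dom_calculate_thrust distance → Spec_calculate_thrust distance (calculate_thrust distance)

-- ===== LEMMAS AND PROOFS =====

theorem ct_eq (d : Int) : calculate_thrust d = calculate_thrust_alt d := by
  unfold calculate_thrust calculate_thrust_alt
  by_cases h0 : d > 5000
  · simp [ctScan, ctLoop, pvThresholds, pvThrusts, PySem.List.pyGet?, PySem.List.pyIdx?, show (0:Int) < d by omega, show (100:Int) < d by omega, show (250:Int) < d by omega, show (500:Int) < d by omega, show (1000:Int) < d by omega, show (2000:Int) < d by omega, show (5000:Int) < d by omega]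
  by_cases h1 : d > 2000
  · simp [ctScan, ctLoop, pvThresholds, pvThrusts, PySem.List.pyGet?, PySem.List.pyIdx?, show (0:Int) < d by omega, show (100:Int) < d by omega, show (250:Int) < d by omega, show (500:Int) < d by omega, show (1000:Int) < d by omega, show (2000:Int) < d by omega, show ¬ (5000:Int) < d by omega]
  by_cases h2 : d > 1000
  · simp [ctScan, ctLoop, pvThresholds, pvThrusts, PySem.List.pyGet?, PySem.List.pyIdx?, show (0:Int) < d by omega, show (100:Int) < d by omega, show (250:Int) < d by omega, show (500:Int) < d by omega, show (1000:Int) < d by omega, show ¬ (2000:Int) < d by omega, show ¬ (5000:Int) < d by omega]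
  by_cases h3 : d > 500
  · simp [ctScan, ctLoop, pvThresholds, pvThrusts, PySem.List.pyGet?, PySem.List.pyIdx?, show (0:Int) < d by omega, show (100:Int) < d by omega, show (250:Int) < d by omega, show (500:Int) < d by omega, show ¬ (1000:Int) < d by omega, show ¬ (2000:Int) < d by omega, show ¬ (5000:Int) < d by omega]
  by_cases h4 : d > 250
  · simp [ctScan, ctLoop, pvThresholds, pvThrusts, PySem.List.pyGet?, PySem.List.pyIdx?, show (0:Int) < d by omega, show (100:Int) < d by omega, show (250:Int) < d by omega, show ¬ (500:Int) < d by omega, show ¬ (1000:Int) < d by omega, show ¬ (2000:Int) < d by omega, show ¬ (5000:Int) < d by omega]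
  by_cases h5 : d > 100
  · simp [ctScan, ctLoop, pvThresholds, pvThrusts, PySem.List.pyGet?, PySem.List.pyIdx?, show (0:Int) < d by omega, show (100:Int) < d by omega, show ¬ (250:Int) < d by omega, show ¬ (500:Int) < d by omega, show ¬ (1000:Int) < d by omega, show ¬ (2000:Int) < d by omega, show ¬ (5000:Int) < d by omega]
  by_cases h6 : d > 0
  · simp [ctScan, ctLoop, pvThresholds, pvThrusts, PySem.List.pyGet?, PySem.List.pyIdx?, show (0:Int) < d by omega, show ¬ (100:Int) < d by omega, show ¬ (250:Int) < d by omega, show ¬ (500:Int) < d by omega, show ¬ (1000:Int) < d by omega, show ¬ (2000:Int) < d by omega, show ¬ (5000:Int) < d by omega]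
  · simp [ctScan, ctLoop, pvThresholds, pvThrusts, PySem.List.pyGet?, PySem.List.pyIdx?, show ¬ (0:Int) < d by omega, show ¬ (100:Int) < d by omega, show ¬ (250:Int) < d by omega, show ¬ (500:Int) < d by omega, show ¬ (1000:Int) < d by omega, show ¬ (2000:Int) < d by omega, show ¬ (5000:Int) < d by omega]

-- ===== VERDICT (by name: the statement is the Claim_ definition above) =====
theorem calculate_thrust_spec : Claim_equal_calculate_thrust := by
  intro d _
  unfold Spec_calculate_thrust
  exact ct_eq d
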